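-- pv_equiv track=rewrite | github.com/DancingOnAir/LeetcodePythonSolution | String/2129_capitalize_the_title.py | capitalizeTitle2
-- ===== SOURCE A (Python) =====
-- def capitalizeTitle2(title: str) -> str:
--     title = list(title)
--     j = 0
--     for i in range(len(title) + 1):
--         if i == len(title) or title[i] == ' ':
--             if i - j > 2:
--                 title[j] = title[j].upper()
--             j = i + 1
--         else:
--             title[i] = title[i].lower()
--     return ''.join(title)
-- ===== SOURCE B (Python) =====
-- def capitalizeTitle2(title: str) -> str:
--     return ' '.join(
--         w.capitalize() if len(w) > 2 else w.lower()
--         for w in title.split(' ')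
--     )
-- ===== Notes on version B (the rewrite author's own statement) =====
-- stated objective: idiomatic
-- what changed: Replaced the char-by-char scan with word-start index bookkeeping by a word-level decomposition: split on single spaces, map each word to capitalize()/lower(), and join with spaces.
import Mathlib
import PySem

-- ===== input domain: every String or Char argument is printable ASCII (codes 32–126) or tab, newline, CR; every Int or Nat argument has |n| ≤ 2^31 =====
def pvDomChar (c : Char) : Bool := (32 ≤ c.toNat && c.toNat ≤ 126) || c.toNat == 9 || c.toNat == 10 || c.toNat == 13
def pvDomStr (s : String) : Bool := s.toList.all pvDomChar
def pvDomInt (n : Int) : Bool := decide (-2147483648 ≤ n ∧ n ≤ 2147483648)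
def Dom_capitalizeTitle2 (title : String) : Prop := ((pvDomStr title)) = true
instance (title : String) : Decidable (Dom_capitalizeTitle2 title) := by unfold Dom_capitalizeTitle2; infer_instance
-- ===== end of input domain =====

-- B is a word-level decomposition (split on ' ', capitalize/lower each word, join) replacing A's
-- single char-by-char scan with index bookkeeping; objective: simpler/idiomatic, same cost.

-- ===== PORT A =====
-- the for-loop over i in range(len(title)+1), mutating the char list in place; state = (list, j, i)
def capitalizeTitle2Loop (l : List Char) (j i : Nat) : List Char :=
  if h : i < l.length then
    if l.getD i ' ' = ' ' then
      capitalizeTitle2Loop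
        (if 2 < i - j then l.set j (PySem.Chars.upperChar (l.getD j ' ')) else l) (i+1) (i+1)
    else
      capitalizeTitle2Loop (l.set i (PySem.Chars.lowerChar (l.getD i ' '))) j (i+1)
  else
    -- last iteration i == len(title): the 'i == len(title)' boundary branch, then the loop ends
    if 2 < i - j then l.set j (PySem.Chars.upperChar (l.getD j ' ')) else l
termination_by l.length - i
decreasing_by all_goals simp [List.length_set, apply_ite List.length]; omega

def capitalizeTitle2 (title : String) : String :=
  String.mk (capitalizeTitle2Loop title.toList 0 0)

-- ===== PORT B =====
-- str.capitalize ported by hand: first char uppercased, the rest lowercased (exact on ASCII)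
def pyCapitalize (w : List Char) : List Char :=
  match w with
  | [] => []
  | c :: cs => PySem.Chars.upperChar c :: PySem.Chars.lower cs

def capitalizeTitle2_alt (title : String) : String :=
  String.mk (PySem.Chars.join [' ']
    ((PySem.Chars.splitOn title.toList [' ']).map
      (fun w => if 2 < w.length then pyCapitalize w else PySem.Chars.lower w)))

-- ===== PRECONDITION & SPEC =====
def Spec_capitalizeTitle2 (title : String) (out : String) : Prop := out = capitalizeTitle2_alt title
instance (title : String) (out : String) : Decidable (Spec_capitalizeTitle2 title out) := by unfold Spec_capitalizeTitle2; infer_instance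

-- ===== CLAIM (what is proved, stated in full; the proofs are below) =====
def Claim_equal_capitalizeTitle2 : Prop := ∀ (title : String), Dom_capitalizeTitle2 title → Spec_capitalizeTitle2 title (capitalizeTitle2 title)

-- ===== LEMMAS AND PROOFS =====

-- the transformation B applies to one word
def pvTrans (w : List Char) : List Char :=
  if 2 < w.length then pyCapitalize w else PySem.Chars.lower w

-- reference single-pass splitter on ' ' (cur = current word so far)
def pvSplit (cur : List Char) : List Char → List (List Char)
  | [] => [cur]
  | c :: rest => if c = ' ' then cur :: pvSplit [] rest else pvSplit (cur ++ [c]) rest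

theorem pv_toNat_ofNat (n : Nat) (h : n < 55296) : (Char.ofNat n).toNat = n := by
  unfold Char.ofNat Char.toNat
  simp [Char.ofNatAux, Nat.isValidChar, h]

theorem pv_upper_lower (c : Char) :
    PySem.Chars.upperChar (PySem.Chars.lowerChar c) = PySem.Chars.upperChar c := by
  unfold PySem.Chars.lowerChar PySem.Chars.upperChar PySem.Chars.isupper PySem.Chars.islower
  simp only [Char.le_def, UInt32.le_iff_toNat_le, Bool.and_eq_true, decide_eq_true_eq]
  have hv : ∀ d : Char, d.val.toNat = d.toNat := fun _ => rfl
  simp only [hv, show 'A'.toNat = 65 from rfl, show 'Z'.toNat = 90 from rfl,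
    show 'a'.toNat = 97 from rfl, show 'z'.toNat = 122 from rfl]
  by_cases h : 65 ≤ c.toNat ∧ c.toNat ≤ 90
  · have ht : (Char.ofNat (c.toNat + 32)).toNat = c.toNat + 32 := pv_toNat_ofNat _ (by omega)
    rw [if_pos h]
    rw [if_pos (by rw [ht]; omega), if_neg (by omega), ht]
    apply Char.ext
    show (Char.ofNat (c.toNat + 32 - 32)).val = c.val
    rw [show c.toNat + 32 - 32 = c.toNat from by omega]
    exact congrArg Char.val (Char.ofNat_toNat c)
  · rw [if_neg h]

-- splitOn's fueled worker computes pvSplit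
theorem pv_go_eq (l : List Char) : ∀ (fuel : Nat) (cur : List Char) (acc : List (List Char)),
    l.length < fuel →
    PySem.Chars.splitOn.go [' '] fuel l cur acc = acc.reverse ++ pvSplit cur.reverse l := by
  induction l with
  | nil =>
    intro fuel cur acc h
    match fuel, h with
    | fuel+1, _ => simp [PySem.Chars.splitOn.go, pvSplit]
  | cons c rest ih =>
    intro fuel cur acc h
    match fuel, h with
    | fuel+1, h =>
      simp only [PySem.Chars.splitOn.go]
      by_cases hc : c = ' '
      · subst hc
        rw [if_pos (by simp [List.isPrefixOf])]
        rw [show List.drop [' '].length (' ' :: rest) = rest from rfl]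
        rw [ih fuel [] (cur.reverse :: acc) (by simp at h ⊢; omega)]
        simp [pvSplit]
      · rw [if_neg (by simp [List.isPrefixOf]; exact fun hh => hc hh.symm)]
        rw [ih fuel (c :: cur) acc (by simp at h ⊢; omega)]
        simp [pvSplit, hc]

theorem pv_splitOn_eq (l : List Char) : PySem.Chars.splitOn l [' '] = pvSplit [] l := by
  unfold PySem.Chars.splitOn
  rw [pv_go_eq l (l.length + 1) [] [] (by omega)]
  simp

theorem pvSplit_no_space (l : List Char) : ∀ cur, (∀ c ∈ l, c ≠ ' ') → pvSplit cur l = [cur ++ l] := by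
  induction l with
  | nil => intro cur _; simp [pvSplit]
  | cons c rest ih =>
    intro cur h
    rw [pvSplit, if_neg (h c (by simp))]
    rw [ih (cur ++ [c]) (fun x hx => h x (by simp [hx]))]
    simp

theorem pvSplit_space (w : List Char) : ∀ cur rest, (∀ c ∈ w, c ≠ ' ') →
    pvSplit cur (w ++ ' ' :: rest) = (cur ++ w) :: pvSplit [] rest := by
  induction w with
  | nil => intro cur rest _; simp [pvSplit]
  | cons c w' ih =>
    intro cur rest h
    rw [List.cons_append, pvSplit, if_neg (h c (by simp))]
    rw [ih (cur ++ [c]) rest (fun x hx => h x (by simp [hx]))]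
    simp

theorem pvSplit_ne_nil (l : List Char) : ∀ cur, pvSplit cur l ≠ [] := by
  induction l with
  | nil => intro cur; simp [pvSplit]
  | cons c rest ih =>
    intro cur
    rw [pvSplit]
    split_ifs
    · simp
    · exact ih _

-- a fully processed prefix shifts out of the loop
theorem pv_loop_shift (rest : List Char) (j i : Nat) : ∀ (done : List Char),
    j ≤ i → i ≤ rest.length →
    capitalizeTitle2Loop (done ++ rest) (done.length + j) (done.length + i)
      = done ++ capitalizeTitle2Loop rest j i := by
  induction rest, j, i using capitalizeTitle2Loop.induct with
  | case1 l j i h hsp ih =>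
    intro done hj hi
    rw [capitalizeTitle2Loop, dif_pos (by simp; omega)]
    rw [List.getD_append_right _ _ _ _ (by omega),
        show done.length + i - done.length = i from by omega, if_pos hsp]
    conv_rhs => rw [capitalizeTitle2Loop, dif_pos h, if_pos hsp]
    rw [show done.length + i - (done.length + j) = i - j from by omega]
    by_cases h2 : 2 < i - j
    · rw [if_pos h2]
      conv_rhs => rw [if_pos h2]
      rw [List.getD_append_right _ _ _ _ (by omega),
          show done.length + j - done.length = j from by omega,
          List.set_append_right _ _ (by omega),
          show done.length + j - done.length = j from by omega]
      simp only [dif_pos h2] at ih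
      exact ih done le_rfl (by simp [List.length_set]; omega)
    · rw [if_neg h2]
      conv_rhs => rw [if_neg h2]
      simp only [dif_neg h2] at ih
      exact ih done le_rfl (by omega)
  | case2 l j i h hsp ih =>
    intro done hj hi
    rw [capitalizeTitle2Loop, dif_pos (by simp; omega)]
    rw [List.getD_append_right _ _ _ _ (by omega),
        show done.length + i - done.length = i from by omega, if_neg hsp]
    conv_rhs => rw [capitalizeTitle2Loop, dif_pos h, if_neg hsp]
    rw [List.set_append_right _ _ (by omega),
        show done.length + i - done.length = i from by omega]
    exact ih done (by omega) (by simp [List.length_set]; omega)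
  | case3 l j i h h2 =>
    intro done hj hi
    rw [capitalizeTitle2Loop, dif_neg (by simp; omega)]
    conv_rhs => rw [capitalizeTitle2Loop, dif_neg h]
    rw [show done.length + i - (done.length + j) = i - j from by omega, if_pos h2]
    conv_rhs => rw [if_pos h2]
    rw [List.getD_append_right _ _ _ _ (by omega),
        show done.length + j - done.length = j from by omega,
        List.set_append_right _ _ (by omega),
        show done.length + j - done.length = j from by omega]
  | case4 l j i h h2 =>
    intro done hj hi
    rw [capitalizeTitle2Loop, dif_neg (by simp; omega)]
    conv_rhs => rw [capitalizeTitle2Loop, dif_neg h]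
    rw [show done.length + i - (done.length + j) = i - j from by omega, if_neg h2]
    conv_rhs => rw [if_neg h2]

-- scanning a space-free word lowercases it char by char
theorem pv_loop_scan (w : List Char) : ∀ (pre rest : List Char), (∀ c ∈ w, c ≠ ' ') →
    capitalizeTitle2Loop (pre ++ (w ++ rest)) 0 pre.length
      = capitalizeTitle2Loop (pre ++ (PySem.Chars.lower w ++ rest)) 0 (pre.length + w.length) := by
  induction w with
  | nil => intro pre rest _; simp [PySem.Chars.lower]
  | cons c w' ih =>
    intro pre rest hw
    rw [capitalizeTitle2Loop, dif_pos (by simp; try omega)]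
    rw [List.getD_append_right _ _ _ _ le_rfl, Nat.sub_self]
    simp only [List.cons_append, List.getD_cons_zero]
    rw [if_neg (hw c (by simp))]
    rw [List.set_append_right _ _ le_rfl, Nat.sub_self, List.set_cons_zero]
    have heq : pre ++ PySem.Chars.lowerChar c :: (w' ++ rest)
        = (pre ++ [PySem.Chars.lowerChar c]) ++ (w' ++ rest) := by simp
    have hlen : pre.length + 1 = (pre ++ [PySem.Chars.lowerChar c]).length := by simp
    rw [heq, hlen, ih (pre ++ [PySem.Chars.lowerChar c]) rest (fun x hx => hw x (by simp [hx]))]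
    simp only [PySem.Chars.lower, List.map_cons, List.append_assoc, List.singleton_append,
      List.length_append, List.length_cons, List.length_nil]
    congr 1
    omega

theorem pvTrans_length (w : List Char) : (pvTrans w).length = w.length := by
  unfold pvTrans
  split_ifs with h
  · match w, h with
    | c :: cs, _ => simp [pyCapitalize, PySem.Chars.lower]
  · simp [PySem.Chars.lower]

-- the processed word at a boundary is exactly pvTrans
theorem pv_boundary (w : List Char) (rest : List Char) :
    (if 2 < w.length then
        (PySem.Chars.lower w ++ rest).set 0
          (PySem.Chars.upperChar ((PySem.Chars.lower w ++ rest).getD 0 ' '))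
      else PySem.Chars.lower w ++ rest) = pvTrans w ++ rest := by
  unfold pvTrans
  split_ifs with h
  · match w, h with
    | c :: cs, _ =>
      simp [PySem.Chars.lower, pyCapitalize, pv_upper_lower]
  · rfl

theorem pv_decomp (l : List Char) :
    (∀ c ∈ l, c ≠ ' ') ∨ ∃ w rest, (∀ c ∈ w, c ≠ ' ') ∧ l = w ++ ' ' :: rest := by
  induction l with
  | nil => left; simp
  | cons c rest' ih =>
    by_cases hc : c = ' '
    · right; exact ⟨[], rest', by simp, by simp [hc]⟩
    · rcases ih with h | ⟨w, rest, hw, heq⟩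
      · left; intro x hx; rcases List.mem_cons.1 hx with rfl | hx
        · exact hc
        · exact h x hx
      · right
        refine ⟨c :: w, rest, ?_, by simp [heq]⟩
        intro x hx
        rcases List.mem_cons.1 hx with rfl | hx
        · exact hc
        · exact hw x hx

theorem pv_main_word (w : List Char) (hw : ∀ c ∈ w, c ≠ ' ') :
    capitalizeTitle2Loop w 0 0 = pvTrans w := by
  have hscan := pv_loop_scan w [] [] hw
  simp only [List.nil_append, List.append_nil, List.length_nil, Nat.zero_add] at hscan
  rw [hscan, capitalizeTitle2Loop,
      dif_neg (by simp [PySem.Chars.lower])]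
  have := pv_boundary w []
  simp only [List.append_nil] at this
  simpa using this

theorem pv_main (n : Nat) : ∀ (l : List Char), l.length ≤ n →
    capitalizeTitle2Loop l 0 0 = PySem.Chars.join [' '] ((pvSplit [] l).map pvTrans) := by
  induction n with
  | zero =>
    intro l hl
    have : l = [] := List.eq_nil_of_length_eq_zero (by omega)
    subst this
    simp [pvSplit, PySem.Chars.join_singleton, pv_main_word [] (by simp)]
  | succ n ih =>
    intro l hl
    rcases pv_decomp l with hw | ⟨w, rest, hw, rfl⟩
    · rw [pvSplit_no_space l [] hw]
      simp only [List.nil_append, List.map_cons, List.map_nil, PySem.Chars.join_singleton]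
      exact pv_main_word l hw
    · rw [pvSplit_space w [] rest hw]
      have hscan := pv_loop_scan w [] (' ' :: rest) hw
      simp only [List.nil_append, List.length_nil, Nat.zero_add] at hscan
      rw [hscan, capitalizeTitle2Loop,
          dif_pos (by simp [PySem.Chars.lower]; try omega)]
      rw [List.getD_append_right _ _ _ _ (by simp [PySem.Chars.lower]),
          show w.length - (PySem.Chars.lower w).length = 0 from by simp [PySem.Chars.lower],
          List.getD_cons_zero, if_pos rfl]
      rw [show w.length - 0 = w.length from by omega]
      rw [pv_boundary w (' ' :: rest)]
      have hsplit : pvTrans w ++ ' ' :: rest = (pvTrans w ++ [' ']) ++ rest := by simp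
      have hlen : w.length + 1 = (pvTrans w ++ [' ']).length := by simp [pvTrans_length]
      rw [hsplit, hlen,
          show ((pvTrans w ++ [' ']).length : Nat) = (pvTrans w ++ [' ']).length + 0 from rfl,
          pv_loop_shift rest 0 0 (pvTrans w ++ [' ']) le_rfl (Nat.zero_le _)]
      rw [ih rest (by simp at hl; try omega)]
      obtain ⟨b, bs, hbs⟩ := List.exists_cons_of_ne_nil (pvSplit_ne_nil rest [])
      rw [hbs]
      simp only [List.nil_append, List.map_cons, PySem.Chars.join_cons_cons]

-- ===== VERDICT (by name: the statement is the Claim_ definition above) =====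
theorem capitalizeTitle2_spec : Claim_equal_capitalizeTitle2 := by
  intro title _
  unfold Spec_capitalizeTitle2 capitalizeTitle2 capitalizeTitle2_alt
  rw [pv_main title.toList.length title.toList le_rfl, pv_splitOn_eq]
  rfl
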